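-- pv_equiv track=rewrite | github.com/prabowo02/toki-regular-open-contest | troc-12/troc-12-kursi/solution_rama.py | Solve
-- ===== SOURCE A (Python) =====
-- def Solve(X, Y, T, L):
--   # T = 0: detect form (1, 1), T = 1: detect form (3, 1)
--   # T = 2: detect form (1, 3), T = 3: detect form (7, 3)
--   while True:
--     if X == 0 or Y == 0: return False
--     while L > 2 and L // 2 > max(X, Y): L //= 2
--     if   X == L // 2 and Y == L // 2: return T == 0
--     elif X == L // 2 or  Y == L // 2: return False
--     elif X >= L // 2 and Y >= L // 2: X, Y = X - L // 2, Y - L // 2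
--     elif X >= L // 2 and Y <= L // 2: X, T = L - X, T ^ 1
--     elif X <= L // 2 and Y >= L // 2: Y, T = L - Y, T ^ 2
-- ===== SOURCE B (Python) =====
-- # Same classification computed by a recursion over the quadrant structure:
-- # the scale is cut to size with one bit_length computation instead of a halving
-- # loop, and the reflection flips are accumulated into a mask that is compared
-- # with T once at the end instead of xoring T along the way.
--
-- def _shrink(L, m):
--     # value of `while L > 2 and L // 2 > max(X, Y): L //= 2` (for m >= 1 this
--     # condition is exactly L > 2*m + 1), computed via bit lengths
--     c = 2 * m + 1
--     k = max(L.bit_length() - c.bit_length(), 0)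
--     if (L >> k) > c:
--         k += 1
--     return L >> k
--
-- def _detect(X, Y, L):
--     # Option: the xor-mask picked up on the way to a centre point, else None
--     if X == 0 or Y == 0:
--         return None
--     L = _shrink(L, max(X, Y))
--     h = L // 2
--     if X == h and Y == h:
--         return 0
--     if X == h or Y == h:
--         return None
--     if X > h and Y > h:
--         return _detect(X - h, Y - h, L)
--     if X > h:
--         r = _detect(L - X, Y, L)
--         return None if r is None else r ^ 1
--     r = _detect(X, L - Y, L)
--     return None if r is None else r ^ 2
--
-- def Solve(X, Y, T, L):
--     r = _detect(X, Y, L)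
--     return r is not None and T == r
-- ===== Notes on version B (the rewrite author's own statement) =====
-- stated objective: alternative
-- what changed: A's infinite while-loop that xors T in place and shrinks L by a halving sub-loop is replaced by a recursion over the quadrant structure that returns the accumulated reflection mask (compared with T once at the end), with the shrink step computed in one shot from bit lengths instead of a loop.
-- outside the precondition, e.g. on Solve(5, 5, 0, 2): A returns True, B returns True; on Solve(-2, -2, 0, -4): A returns True, B raises RecursionError
import Mathlib
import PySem

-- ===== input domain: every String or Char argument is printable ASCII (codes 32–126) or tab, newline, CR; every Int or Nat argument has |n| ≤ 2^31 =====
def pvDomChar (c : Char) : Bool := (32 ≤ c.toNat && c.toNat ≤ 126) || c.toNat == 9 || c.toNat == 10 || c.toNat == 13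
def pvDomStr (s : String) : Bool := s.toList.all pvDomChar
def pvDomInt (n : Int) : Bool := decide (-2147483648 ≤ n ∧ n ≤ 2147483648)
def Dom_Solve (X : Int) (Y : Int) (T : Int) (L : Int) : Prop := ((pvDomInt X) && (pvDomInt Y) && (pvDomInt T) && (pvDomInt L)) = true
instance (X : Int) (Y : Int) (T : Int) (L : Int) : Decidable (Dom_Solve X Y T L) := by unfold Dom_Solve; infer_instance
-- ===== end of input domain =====

-- B recomputes A's classification by a recursion over the quadrant structure: the reflection
-- flips are accumulated into a mask compared with T once at the end (instead of xoring T along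
-- the way), and the scale shrink is computed in one shot from bit lengths instead of a loop.

-- ===== PORT A =====
-- inner `while L > 2 and L // 2 > max(X, Y): L //= 2`; fuel only guards totality (halving terminates)
def pvShrinkA : Nat → Int → Int → Int
  | 0, L, _ => L
  | f + 1, L, m =>
    if 2 < L ∧ m < PySem.Int.floordiv L 2 then pvShrinkA f (PySem.Int.floordiv L 2) m else L

-- the `while True` loop; fuel only guards totality (X + Y strictly decreases on admitted inputs)
def pvLoopA : Nat → Int → Int → Int → Int → Bool
  | 0, _, _, _, _ => false
  | f + 1, X, Y, T, L =>
    if X = 0 ∨ Y = 0 then false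
    else
      let L' := pvShrinkA L.toNat L (max X Y)
      let h := PySem.Int.floordiv L' 2
      if X = h ∧ Y = h then decide (T = 0)
      else if X = h ∨ Y = h then false
      else if h ≤ X ∧ h ≤ Y then pvLoopA f (X - h) (Y - h) T L'
      else if h ≤ X ∧ Y ≤ h then pvLoopA f (L' - X) Y (PySem.Int.bxor T 1) L'
      else if X ≤ h ∧ h ≤ Y then pvLoopA f X (L' - Y) (PySem.Int.bxor T 2) L'
      else pvLoopA f X Y T L'    -- Python's `while True` spins with unchanged state here

def Solve (X : Int) (Y : Int) (T : Int) (L : Int) : Bool :=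
  pvLoopA (X.toNat + Y.toNat + 1) X Y T L

-- ===== PORT B =====
-- Python `a >> k` for 0 ≤ k: exact as floor division by 2^k
def pvShr (a : Int) (k : Int) : Int := PySem.Int.floordiv a (2 ^ k.toNat)

def pvShrinkB (L : Int) (m : Int) : Int :=
  let c := 2 * m + 1
  let k : Int := max ((PySem.Int.bitLength L : Int) - (PySem.Int.bitLength c : Int)) 0
  let k' := if c < pvShr L k then k + 1 else k
  pvShr L k'

-- `_detect`: the xor-mask accumulated on the way to a centre point, else none;
-- fuel only guards totality (X + Y strictly decreases on admitted inputs)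
def pvDetect : Nat → Int → Int → Int → Option Int
  | 0, _, _, _ => none
  | f + 1, X, Y, L =>
    if X = 0 ∨ Y = 0 then none
    else
      let L' := pvShrinkB L (max X Y)
      let h := PySem.Int.floordiv L' 2
      if X = h ∧ Y = h then some 0
      else if X = h ∨ Y = h then none
      else if h < X ∧ h < Y then pvDetect f (X - h) (Y - h) L'
      else if h < X then (pvDetect f (L' - X) Y L').map (fun r => PySem.Int.bxor r 1)
      else (pvDetect f X (L' - Y) L').map (fun r => PySem.Int.bxor r 2)

def Solve_alt (X : Int) (Y : Int) (T : Int) (L : Int) : Bool :=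
  match pvDetect (X.toNat + Y.toNat + 1) X Y L with
  | none => false
  | some r => decide (T = r)

-- ===== PRECONDITION & SPEC =====
-- Pre_ keeps the inputs with an immediate return (X = 0 or Y = 0) and the natural geometry
-- X, Y ≤ L with 2 ≤ L and at least one nonnegative coordinate: outside it A's `while True`
-- loop diverges on many inputs (e.g. X = Y = L = 1, negative L with positive X and Y, or
-- X = 5, Y = 1, L = 4), and the set of outside points where A does still return (coordinates
-- beyond L, or both negative) is a fractal with no closed-form description.
def Pre_Solve (X : Int) (Y : Int) (T : Int) (L : Int) : Prop :=
  (X = 0 ∨ Y = 0) ∨ (2 ≤ L ∧ X ≤ L ∧ Y ≤ L ∧ (0 ≤ X ∨ 0 ≤ Y))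
instance (X : Int) (Y : Int) (T : Int) (L : Int) : Decidable (Pre_Solve X Y T L) := by
  unfold Pre_Solve; infer_instance

def pvWitness_Solve : Int × Int × Int × Int := (3, 5, 1, 8)

def Spec_Solve (X : Int) (Y : Int) (T : Int) (L : Int) (out : Bool) : Prop := out = Solve_alt X Y T L
instance (X : Int) (Y : Int) (T : Int) (L : Int) (out : Bool) : Decidable (Spec_Solve X Y T L out) := by unfold Spec_Solve; infer_instance

-- ===== CLAIM (what is proved, stated in full; the proofs are below) =====
def Claim_equal_Solve : Prop := ∀ (X : Int) (Y : Int) (T : Int) (L : Int), Dom_Solve X Y T L → Pre_Solve X Y T L → Spec_Solve X Y T L (Solve X Y T L)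

-- ===== LEMMAS AND PROOFS =====

-- xor algebra: xoring twice with the same nonnegative constant is the identity
theorem pvBxorCancel (a : Int) (c : Int) (hc : 0 ≤ c) :
    PySem.Int.bxor (PySem.Int.bxor a c) c = a := by
  unfold PySem.Int.bxor
  by_cases ha : 0 ≤ a
  · simp only [ha, hc, if_true]
    have h1 : (0 : Int) ≤ ((a.toNat ^^^ c.toNat : Nat) : Int) := Int.natCast_nonneg _
    simp only [h1, if_true, Int.toNat_natCast]
    rw [Nat.xor_assoc, Nat.xor_self, Nat.xor_zero]
    omega
  · simp only [ha, hc, if_true, if_false]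
    have h1 : ¬ (0 : Int) ≤ -((((-a - 1).toNat ^^^ c.toNat : Nat) : Int)) - 1 := by
      have := Int.natCast_nonneg ((-a - 1).toNat ^^^ c.toNat : Nat); omega
    simp only [h1, if_false]
    have h2 : (-(-(((((-a - 1).toNat ^^^ c.toNat : Nat) : Int))) - 1) - 1) = ((((-a - 1).toNat ^^^ c.toNat : Nat) : Int)) := by omega
    rw [h2, Int.toNat_natCast, Nat.xor_assoc, Nat.xor_self, Nat.xor_zero]
    omega

theorem pvBxorShift (T r c : Int) (hc : 0 ≤ c) :
    (PySem.Int.bxor T c = r) ↔ (T = PySem.Int.bxor r c) := by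
  constructor
  · rintro rfl; exact (pvBxorCancel T c hc).symm
  · rintro rfl; exact pvBxorCancel r c hc

-- bit-length facts
theorem pvBlMono (a b : Int) (h0 : 0 ≤ a) (hab : a ≤ b) :
    PySem.Int.bitLength a ≤ PySem.Int.bitLength b := by
  by_contra hlt
  have ha0 : a ≠ 0 := by
    intro h
    rw [h] at hlt
    simp [PySem.Int.bitLength_zero] at hlt
  have h1 := PySem.Int.two_pow_bitLength_le a ha0
  have h2 := PySem.Int.lt_two_pow_bitLength b
  have h3 : 2 ^ PySem.Int.bitLength b ≤ 2 ^ (PySem.Int.bitLength a - 1) :=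
    Nat.pow_le_pow_right (by norm_num) (by omega)
  omega

theorem pvIntLtPowBl (a : Int) (_h0 : 0 ≤ a) : a < 2 ^ PySem.Int.bitLength a := by
  have h := PySem.Int.lt_two_pow_bitLength a
  exact lt_of_le_of_lt Int.le_natAbs (by exact_mod_cast h)

theorem pvPowBlLe (a : Int) (h0 : 0 < a) : (2 : Int) ^ (PySem.Int.bitLength a - 1) ≤ a := by
  have h := PySem.Int.two_pow_bitLength_le a (by omega)
  calc (2 : Int) ^ (PySem.Int.bitLength a - 1)
      = ((2 ^ (PySem.Int.bitLength a - 1) : Nat) : Int) := by push_cast; ring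
    _ ≤ (a.natAbs : Int) := by exact_mod_cast h
    _ = a := Int.natAbs_of_nonneg (by omega)

theorem pvShr_zero (a : Int) : pvShr a 0 = a := by
  unfold pvShr
  norm_num [PySem.Int.floordiv_eq_ediv_of_pos (show (0:Int) < 1 by norm_num)]

theorem pvShr_one (a : Int) : pvShr a 1 = PySem.Int.floordiv a 2 := by
  unfold pvShr
  norm_num

-- floor-halving composes with shifting
theorem pvShr_floordiv (L : Int) (j : Int) (hj : 0 ≤ j) :
    pvShr (PySem.Int.floordiv L 2) j = pvShr L (j + 1) := by
  unfold pvShr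
  have hk : (j + 1).toNat = j.toNat + 1 := by omega
  rw [hk, PySem.Int.floordiv_eq_ediv_of_pos (show (0:Int) < 2 by norm_num),
      PySem.Int.floordiv_eq_ediv_of_pos (show (0:Int) < 2 ^ j.toNat by positivity),
      PySem.Int.floordiv_eq_ediv_of_pos (show (0:Int) < 2 ^ (j.toNat + 1) by positivity),
      Int.ediv_ediv_of_nonneg (by norm_num : (0:Int) ≤ 2)]
  congr 1
  ring

theorem pvShrinkB_stop (L m : Int) (_hm : 1 ≤ m) (hL : 0 ≤ L) (h : L ≤ 2 * m + 1) :
    pvShrinkB L m = L := by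
  have hble := pvBlMono L (2 * m + 1) hL h
  simp only [pvShrinkB]
  have hk : max ((PySem.Int.bitLength L : Int) - (PySem.Int.bitLength (2 * m + 1) : Int)) 0 = 0 := by
    omega
  simp [hk, pvShr_zero, show ¬ (2 * m + 1 < L) by omega]

theorem pvShrinkB_step (L m : Int) (hm : 1 ≤ m) (h : 2 * m + 1 < L) :
    pvShrinkB L m = pvShrinkB (PySem.Int.floordiv L 2) m := by
  have hfd : PySem.Int.floordiv L 2 = L / 2 := PySem.Int.floordiv_eq_ediv_of_pos (by norm_num)
  have hbl : PySem.Int.bitLength L = PySem.Int.bitLength (PySem.Int.floordiv L 2) + 1 :=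
    PySem.Int.bitLength_of_pos (by omega)
  have hble : PySem.Int.bitLength (2 * m + 1) ≤ PySem.Int.bitLength L := pvBlMono _ _ (by omega) (by omega)
  have hbc1 : 1 ≤ PySem.Int.bitLength (2 * m + 1) := by
    by_contra hh
    have hz : PySem.Int.bitLength (2 * m + 1) = 0 := by omega
    have hlt := pvIntLtPowBl (2 * m + 1) (by omega)
    rw [hz] at hlt
    norm_num at hlt
    omega
  simp only [pvShrinkB]
  by_cases hbc : PySem.Int.bitLength (2 * m + 1) = PySem.Int.bitLength L
  · -- equal bit lengths: one halving on the left, none on the right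
    have hk : max ((PySem.Int.bitLength L : Int) - (PySem.Int.bitLength (2 * m + 1) : Int)) 0 = 0 := by omega
    have hk' : max ((PySem.Int.bitLength (PySem.Int.floordiv L 2) : Int) - (PySem.Int.bitLength (2 * m + 1) : Int)) 0 = 0 := by omega
    rw [hk, hk', pvShr_zero, pvShr_zero, if_pos (by omega)]
    have hLlt : L < 2 ^ PySem.Int.bitLength L := pvIntLtPowBl L (by omega)
    have hcge : (2 : Int) ^ (PySem.Int.bitLength (2 * m + 1) - 1) ≤ 2 * m + 1 := pvPowBlLe _ (by omega)
    have hpow : (2 : Int) ^ PySem.Int.bitLength (2 * m + 1) = 2 * 2 ^ (PySem.Int.bitLength (2 * m + 1) - 1) := by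
      have hsub : PySem.Int.bitLength (2 * m + 1) - 1 + 1 = PySem.Int.bitLength (2 * m + 1) := by omega
      calc (2 : Int) ^ PySem.Int.bitLength (2 * m + 1)
          = 2 ^ (PySem.Int.bitLength (2 * m + 1) - 1 + 1) := by rw [hsub]
        _ = 2 * 2 ^ (PySem.Int.bitLength (2 * m + 1) - 1) := by ring
    rw [hbc] at hcge hpow
    have hnot : ¬ (2 * m + 1 < PySem.Int.floordiv L 2) := by
      rw [hfd]; omega
    rw [if_neg hnot]
    norm_num [pvShr_one, pvShr_zero]
  · -- strictly larger: both sides shift by counts differing by one over L and L // 2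
    set j : Int := (PySem.Int.bitLength L : Int) - (PySem.Int.bitLength (2 * m + 1) : Int) with hj
    have hj1 : 1 ≤ j := by omega
    have hmax : max j 0 = j := by omega
    have hbl3 : ((PySem.Int.bitLength (PySem.Int.floordiv L 2) : Int) - (PySem.Int.bitLength (2 * m + 1) : Int)) = j - 1 := by omega
    have hmax' : max ((PySem.Int.bitLength (PySem.Int.floordiv L 2) : Int) - (PySem.Int.bitLength (2 * m + 1) : Int)) 0 = j - 1 := by omega
    have hshr : pvShr (PySem.Int.floordiv L 2) (j - 1) = pvShr L j := by
      rw [pvShr_floordiv L (j - 1) (by omega)]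
      norm_num
    rw [hmax, hmax', hshr]
    by_cases hcd : 2 * m + 1 < pvShr L j
    · rw [if_pos hcd, if_pos hcd]
      have : pvShr (PySem.Int.floordiv L 2) (j - 1 + 1) = pvShr L (j + 1) := by
        rw [pvShr_floordiv L (j - 1 + 1) (by omega)]
        norm_num
      rw [← this]
    · rw [if_neg hcd, if_neg hcd, hshr]

-- the halving loop equals the bit-length computation
theorem pvShrinkEq : ∀ (f : Nat) (L m : Int), 1 ≤ m → 2 ≤ L → L.toNat ≤ f →
    pvShrinkA f L m = pvShrinkB L m := by
  intro f
  induction f with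
  | zero => intro L m hm hL hf; omega
  | succ f ih =>
    intro L m hm hL hf
    rw [pvShrinkA]
    have hcond : (2 < L ∧ m < PySem.Int.floordiv L 2) ↔ 2 * m + 1 < L := by
      rw [PySem.Int.floordiv_eq_ediv_of_pos (show (0:Int) < 2 by norm_num)]
      omega
    by_cases hc : 2 * m + 1 < L
    · have h2 : 2 ≤ PySem.Int.floordiv L 2 := by
        rw [PySem.Int.floordiv_eq_ediv_of_pos (show (0:Int) < 2 by norm_num)]; omega
      have hfdn : (PySem.Int.floordiv L 2).toNat ≤ f := by
        rw [PySem.Int.floordiv_eq_ediv_of_pos (show (0:Int) < 2 by norm_num)]; omega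
      rw [if_pos (hcond.mpr hc), ih _ _ hm h2 hfdn, ← pvShrinkB_step L m hm hc]
    · rw [if_neg (fun hh => hc (hcond.mp hh)), pvShrinkB_stop L m hm (by omega) (by omega)]

-- invariants of the shrunken scale
theorem pvShrinkProps : ∀ (f : Nat) (L m : Int), 1 ≤ m → m ≤ L → 2 ≤ L → L.toNat ≤ f →
    2 ≤ pvShrinkA f L m ∧ m ≤ pvShrinkA f L m ∧ pvShrinkA f L m ≤ 2 * m + 1 := by
  intro f
  induction f with
  | zero => intro L m hm hmL hL hf; omega
  | succ f ih =>
    intro L m hm hmL hL hf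
    rw [pvShrinkA]
    have hfd2 : PySem.Int.floordiv L 2 = L / 2 :=
      PySem.Int.floordiv_eq_ediv_of_pos (by norm_num)
    by_cases hc : 2 < L ∧ m < PySem.Int.floordiv L 2
    · rw [if_pos hc]
      rw [hfd2] at hc
      exact ih _ _ hm (by omega) (by omega) (by omega)
    · rw [if_neg hc]
      rw [hfd2] at hc
      omega

-- main loop/recursion correspondence
theorem pvMain : ∀ (f : Nat) (X Y T L : Int), X ≤ L → Y ≤ L → (0 ≤ X ∨ 0 ≤ Y) → 2 ≤ L →
    X.toNat + Y.toNat < f →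
    pvLoopA f X Y T L = (match pvDetect f X Y L with
      | none => false
      | some r => decide (T = r)) := by
  intro f
  induction f with
  | zero => intro X Y T L h2 h4 hxy h5 hf; omega
  | succ f ih =>
    intro X Y T L h2 h4 hxy h5 hf
    simp only [pvLoopA, pvDetect]
    by_cases h0 : X = 0 ∨ Y = 0
    · simp [h0]
    · simp only [h0, if_false]
      have hm1 : 1 ≤ max X Y := by omega
      have hmL : max X Y ≤ L := by omega
      have hEq : pvShrinkA L.toNat L (max X Y) = pvShrinkB L (max X Y) :=
        pvShrinkEq L.toNat L (max X Y) hm1 h5 le_rfl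
      obtain ⟨hM2, hMm, hMl⟩ := pvShrinkProps L.toNat L (max X Y) hm1 hmL h5 le_rfl
      rw [hEq] at hM2 hMm hMl
      rw [hEq]
      set M := pvShrinkB L (max X Y) with hMdef
      have hfd : PySem.Int.floordiv M 2 = M / 2 :=
        PySem.Int.floordiv_eq_ediv_of_pos (by norm_num)
      rw [hfd]
      by_cases hc1 : X = M / 2 ∧ Y = M / 2
      · simp [hc1]
      · rw [if_neg hc1, if_neg hc1]
        by_cases hc2 : X = M / 2 ∨ Y = M / 2
        · simp [hc2]
        · rw [if_neg hc2, if_neg hc2]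
          have hXh : X ≠ M / 2 := fun hh => hc2 (Or.inl hh)
          have hYh : Y ≠ M / 2 := fun hh => hc2 (Or.inr hh)
          by_cases hc3 : M / 2 ≤ X ∧ M / 2 ≤ Y
          · -- both strictly above the centre: translate
            have hc3' : M / 2 < X ∧ M / 2 < Y := by omega
            rw [if_pos hc3, if_pos hc3']
            have hXM : X ≤ M := by omega
            have hYM : Y ≤ M := by omega
            exact ih (X - M / 2) (Y - M / 2) T M (by omega) (by omega) (by omega) hM2 (by omega)
          · rw [if_neg hc3]
            by_cases hc4 : M / 2 ≤ X ∧ Y ≤ M / 2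
            · -- X reflected, flip bit 0
              have hc4' : M / 2 < X := by omega
              have hnb : ¬ (M / 2 < X ∧ M / 2 < Y) := by omega
              rw [if_pos hc4, if_neg hnb, if_pos hc4']
              have hXM : X ≤ M := by omega
              have hrec := ih (M - X) Y (PySem.Int.bxor T 1) M (by omega) (by omega) (by omega) hM2 (by omega)
              rw [hrec]
              cases hD : pvDetect f (M - X) Y M with
              | none => simp
              | some r =>
                simp only [Option.map_some]
                exact decide_eq_decide.mpr (pvBxorShift T r 1 (by norm_num))
            · -- Y reflected, flip bit 1
              rw [if_neg hc4]
              have hXlt : X < M / 2 := by omega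
              have hYgt : M / 2 < Y := by omega
              have hc5 : X ≤ M / 2 ∧ M / 2 ≤ Y := by omega
              have hnb : ¬ (M / 2 < X ∧ M / 2 < Y) := by omega
              have hnx : ¬ (M / 2 < X) := by omega
              rw [if_pos hc5, if_neg hnb, if_neg hnx]
              have hYM : Y ≤ M := by omega
              have hrec := ih X (M - Y) (PySem.Int.bxor T 2) M (by omega) (by omega) (by omega) hM2 (by omega)
              rw [hrec]
              cases hD : pvDetect f X (M - Y) M with
              | none => simp
              | some r =>
                simp only [Option.map_some]
                exact decide_eq_decide.mpr (pvBxorShift T r 2 (by norm_num))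

-- ===== VERDICT (by name: the statement is the Claim_ definition above) =====
theorem Solve_spec : Claim_equal_Solve := by
  intro X Y T L _ hpre
  unfold Spec_Solve Solve Solve_alt
  cases hpre with
  | inl h0 => simp [pvLoopA, pvDetect, h0]
  | inr hg =>
    obtain ⟨h5, h2, h4, hxy⟩ := hg
    exact pvMain _ X Y T L h2 h4 hxy h5 (by omega)
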